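-- pv_equiv track=rewrite | github.com/MineTime23/Algorithm | 프로그래머스/unrated/135808. 과일 장수/과일 장수.py | solution
-- ===== SOURCE A (Python) =====
-- def solution(k, m, score):
--     answer = 0
--     score.sort(reverse = True)
--     n = len(score) // m
--     score = score[:(n*m)]
--     for i in range(m-1,len(score),m):
--         answer += score[i] * m
--     return answer
-- ===== SOURCE B (Python) =====
-- def solution(k, m, score):
--     counts = {}
--     for v in score:
--         counts[v] = counts.get(v, 0) + 1
--     total = (len(score) // m) * m
--     ans = 0
--     c = 0
--     for v in sorted(counts, reverse=True):
--         c2 = c + counts[v]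
--         ans += v * (min(c2, total) // m - min(c, total) // m)
--         c = c2
--     return ans * m
-- ===== Notes on version B (the rewrite author's own statement) =====
-- stated objective: alternative
-- what changed: B replaces A's index-stride over the fully sorted list by a run-length computation: one dict pass counts each score, only the distinct values are sorted (descending), and each value's contribution to the group-minimum sum is obtained arithmetically from its prefix-count interval via floor division, instead of indexing every m-th element of the sorted array.
-- outside the precondition, e.g. on solution(1, -2, [3, 1, 2]): A returns 0, B returns 8; on solution(1, 0, [1]): A raises ZeroDivisionError, B raises ZeroDivisionError
import Mathlib
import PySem

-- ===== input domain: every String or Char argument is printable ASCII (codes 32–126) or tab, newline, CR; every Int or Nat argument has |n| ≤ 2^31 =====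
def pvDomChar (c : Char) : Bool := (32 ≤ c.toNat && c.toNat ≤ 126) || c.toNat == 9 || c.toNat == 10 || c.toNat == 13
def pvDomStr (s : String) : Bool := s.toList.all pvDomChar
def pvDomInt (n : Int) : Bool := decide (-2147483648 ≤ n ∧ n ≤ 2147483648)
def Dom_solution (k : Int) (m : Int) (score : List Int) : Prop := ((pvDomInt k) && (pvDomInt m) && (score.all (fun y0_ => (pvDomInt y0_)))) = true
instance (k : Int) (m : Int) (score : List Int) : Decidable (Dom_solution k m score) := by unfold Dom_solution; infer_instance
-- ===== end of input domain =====

-- B counts each score in one dict pass and sums group minima arithmetically over the distinct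
-- values' prefix-count intervals, instead of A's stride over the fully sorted list (objective:
-- alternative). A sorts its 'score' argument in place; the equivalence is about the return value.

-- ===== PORT A =====
def solution (k : Int) (m : Int) (score : List Int) : Int :=
  let s := PySem.List.sorted score (fun x => x) true
  let n := PySem.Int.floordiv (PySem.List.len s) m
  let s2 := PySem.List.slice s none (some (n * m))
  (PySem.List.pyRange (m - 1) (PySem.List.len s2) m).foldl
    (fun answer i => answer + PySem.List.pyGetD s2 i 0 * m) 0

-- ===== PORT B =====
def solution_alt (k : Int) (m : Int) (score : List Int) : Int :=
  let counts := score.foldl (fun d v => d.insert v (d.getD v 0 + 1)) PySem.Dict.empty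
  let total := PySem.Int.floordiv (PySem.List.len score) m * m
  let res := (PySem.List.sorted counts.keys (fun x => x) true).foldl
    (fun (p : Int × Int) v =>
      let c2 := p.2 + counts.getD v 0
      (p.1 + v * (PySem.Int.floordiv (min c2 total) m - PySem.Int.floordiv (min p.2 total) m), c2))
    (0, 0)
  res.1 * m

-- ===== PRECONDITION & SPEC =====
-- Pre_ restricts to positive group size m, the task's natural domain: A raises ZeroDivisionError
-- at m = 0, and for negative m A returns the degenerate value 0 from an empty range.
def Pre_solution (k : Int) (m : Int) (score : List Int) : Prop := 1 ≤ m
instance (k : Int) (m : Int) (score : List Int) : Decidable (Pre_solution k m score) := by unfold Pre_solution; infer_instance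
def pvWitness_solution : Int × Int × List Int := (2, 2, [4, 1, 3, 1])

def Spec_solution (k : Int) (m : Int) (score : List Int) (out : Int) : Prop := out = solution_alt k m score
instance (k : Int) (m : Int) (score : List Int) (out : Int) : Decidable (Spec_solution k m score out) := by unfold Spec_solution; infer_instance

-- ===== CLAIM (what is proved, stated in full; the proofs are below) =====
def Claim_equal_solution : Prop := ∀ (k : Int) (m : Int) (score : List Int), Dom_solution k m score → Pre_solution k m score → Spec_solution k m score (solution k m score)

-- ===== LEMMAS AND PROOFS =====

/-- Strided group-minimum sum of a list read from global position `c`: the element at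
global position `j` contributes iff `(j+1) % M = 0` and `j < total`. -/
def pvS (M total : Nat) : Nat → List Int → Int
  | _, [] => 0
  | c, x :: t => (if (c + 1) % M = 0 ∧ c < total then x else 0) + pvS M total (c + 1) t

theorem pvS_append (M T : Nat) (xs ys : List Int) : ∀ c,
    pvS M T c (xs ++ ys) = pvS M T c xs + pvS M T (c + xs.length) ys := by
  induction xs with
  | nil => intro c; simp [pvS]
  | cons x t ih =>
    intro c
    simp only [List.cons_append, pvS, ih (c + 1), List.length_cons]
    have h : c + 1 + t.length = c + (t.length + 1) := by omega
    rw [h]; ring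


theorem pv_div_step (M T c : Nat) :
    ((min (c + 1) T / M : Nat) : Int) - ((min c T / M : Nat) : Int)
      = (if (c + 1) % M = 0 ∧ c < T then (1 : Int) else 0) := by
  have hmod : (c + 1) % M = 0 ↔ M ∣ c + 1 := Nat.dvd_iff_mod_eq_zero.symm
  by_cases hc : c < T
  · rw [min_eq_left (by omega : c + 1 ≤ T), min_eq_left (by omega : c ≤ T), Nat.succ_div]
    by_cases hd : M ∣ c + 1
    · simp only [hd, hmod, hc, and_true, if_pos]
      push_cast; ring
    · simp [hd, hmod]
  · rw [min_eq_right (by omega : T ≤ c + 1), min_eq_right (by omega : T ≤ c)]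
    rw [if_neg (fun h => hc h.2)]
    simp


theorem pvS_replicate (M T : Nat) (v : Int) : ∀ (f c : Nat),
    pvS M T c (List.replicate f v)
      = v * (((min (c + f) T / M : Nat) : Int) - ((min c T / M : Nat) : Int)) := by
  intro f
  induction f with
  | zero => intro c; simp [pvS]
  | succ f ih =>
    intro c
    rw [List.replicate_succ]
    simp only [pvS]
    rw [ih (c + 1)]
    have hrw : c + 1 + f = c + (f + 1) := by omega
    rw [hrw]
    have hd := pv_div_step M T c
    have hstep : ((min (c + 1) T / M : Nat) : Int)
        = ((min c T / M : Nat) : Int) + (if (c + 1) % M = 0 ∧ c < T then (1 : Int) else 0) := by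
      omega
    rw [hstep]
    split <;> ring

theorem pvS_eq (M T : Nat) (xs : List Int) : ∀ c,
    pvS M T c xs
      = ∑ i ∈ Finset.range xs.length,
          (if (c + i + 1) % M = 0 ∧ c + i < T then xs.getD i 0 else 0) := by
  induction xs with
  | nil => intro c; simp [pvS]
  | cons x t ih =>
    intro c
    simp only [pvS, List.length_cons, Finset.sum_range_succ']
    rw [ih (c + 1)]
    have : ∀ i ∈ Finset.range t.length,
        (if (c + 1 + i + 1) % M = 0 ∧ c + 1 + i < T then t.getD i 0 else 0)
          = (if (c + (i + 1) + 1) % M = 0 ∧ c + (i + 1) < T then (x :: t).getD (i + 1) 0 else 0) := by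
      intro i _
      have h2 : c + 1 + i = c + (i + 1) := by omega
      simp [h2]
    rw [Finset.sum_congr rfl this]
    simp [add_comm]


theorem pvS_stride (M T nN : Nat) (xs : List Int) (hM : 0 < M) (hT : T = nN * M)
    (hlen : T ≤ xs.length) :
    (∑ k ∈ Finset.range nN, xs.getD (M - 1 + M * k) 0) = pvS M T 0 xs := by
  rw [pvS_eq]
  simp only [zero_add]
  rw [← Finset.sum_filter]
  refine Finset.sum_nbij' (fun k => M - 1 + M * k) (fun i => (i + 1) / M - 1) ?_ ?_ ?_ ?_ ?_
  · intro k hk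
    simp only [Finset.mem_filter, Finset.mem_range] at *
    have hb : M * (k + 1) ≤ M * nN := Nat.mul_le_mul_left M hk
    have hb' : M * nN = T := by rw [hT]; ring
    have hx : M * (k + 1) = M * k + M := by ring
    have h1 : M - 1 + M * k + 1 = M * (k + 1) := by omega
    refine ⟨by omega, ?_, by omega⟩
    rw [h1]
    exact Nat.mul_mod_right M (k + 1)
  · intro i hi
    simp only [Finset.mem_filter, Finset.mem_range] at *
    obtain ⟨hiL, hmod, hiT⟩ := hi
    have hdvd : M ∣ i + 1 := Nat.dvd_iff_mod_eq_zero.mpr hmod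
    obtain ⟨q, hq⟩ := hdvd
    have hq1 : 1 ≤ q := by nlinarith
    have : (i + 1) / M = q := by rw [hq]; exact Nat.mul_div_cancel_left q hM
    rw [this]
    have hc : nN * M = M * nN := by ring
    have hle : M * q ≤ M * nN := by omega
    have hqn : q ≤ nN := Nat.le_of_mul_le_mul_left hle hM
    omega
  · intro k hk
    simp only [Finset.mem_range] at hk
    show (M - 1 + M * k + 1) / M - 1 = k
    have hx : M * (k + 1) = M * k + M := by ring
    have h1 : M - 1 + M * k + 1 = M * (k + 1) := by omega
    rw [h1, Nat.mul_div_cancel_left (k + 1) hM]; omega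
  · intro i hi
    simp only [Finset.mem_filter, Finset.mem_range] at hi
    obtain ⟨hiL, hmod, hiT⟩ := hi
    have hdvd : M ∣ i + 1 := Nat.dvd_iff_mod_eq_zero.mpr hmod
    obtain ⟨q, hq⟩ := hdvd
    have hq1 : 1 ≤ q := by nlinarith
    have hdq : (i + 1) / M = q := by rw [hq]; exact Nat.mul_div_cancel_left q hM
    obtain ⟨q', rfl⟩ : ∃ q', q = q' + 1 := ⟨q - 1, by omega⟩
    show M - 1 + M * ((i + 1) / M - 1) = i
    rw [hdq]
    simp only [Nat.add_sub_cancel]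
    have hx2 : M * (q' + 1) = M * q' + M := by ring
    omega
  · intro k hk
    rfl

theorem pv_count_flatMap (l vs : List Int) (hnd : vs.Nodup) (a : Int) :
    (vs.flatMap (fun v => List.replicate (l.count v) v)).count a
      = if a ∈ vs then l.count a else 0 := by
  induction vs with
  | nil => simp
  | cons v vs ih =>
    simp only [List.flatMap_cons, List.count_append, List.count_replicate,
      beq_iff_eq, List.nodup_cons] at *
    rcases hnd with ⟨hv, hnd⟩
    rw [ih hnd]
    by_cases hav : a = v
    · subst hav
      simp [hv]
    · rw [if_neg (fun h => hav h.symm)]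
      by_cases hvs : a ∈ vs
      · simp [hvs, List.mem_cons]
      · simp [hvs, hav, List.mem_cons]


theorem pv_perm_flatMap (l vs : List Int) (hnd : vs.Nodup) (hmem : ∀ x ∈ l, x ∈ vs) :
    (vs.flatMap (fun v => List.replicate (l.count v) v)).Perm l := by
  rw [List.perm_iff_count]
  intro a
  rw [pv_count_flatMap l vs hnd a]
  by_cases h : a ∈ vs
  · simp [h]
  · simp [h]
    exact (List.count_eq_zero.mpr (fun hal => h (hmem a hal))).symm


theorem pv_pairwise_flatMap (vs : List Int) (f : Int → Nat)
    (h : vs.Pairwise (fun a b => b < a)) :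
    (vs.flatMap (fun v => List.replicate (f v) v)).Pairwise (fun a b : Int => b ≤ a) := by
  induction vs with
  | nil => simp
  | cons v vs ih =>
    rcases List.pairwise_cons.mp h with ⟨hlt, htl⟩
    simp only [List.flatMap_cons]
    rw [List.pairwise_append]
    refine ⟨List.pairwise_replicate.mpr ?_, ih htl, ?_⟩
    · exact Or.inr le_rfl
    · intro x hx y hy
      rcases List.mem_flatMap.mp hy with ⟨w, hw, hyw⟩
      rw [List.eq_of_mem_replicate hx, List.eq_of_mem_replicate hyw]
      exact le_of_lt (hlt w hw)

theorem pv_flat (score : List Int) :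
    PySem.List.sorted score (fun x => x) true
      = (PySem.List.sorted (PySem.Set.ofList score) (fun x => x) true).flatMap
          (fun v => List.replicate (score.count v) v) := by
  set vals := PySem.List.sorted (PySem.Set.ofList score) (fun x => x) true with hvals
  have hperm : vals.Perm (PySem.Set.ofList score) := PySem.List.sorted_perm _ _ _
  have hnd : vals.Nodup := hperm.nodup_iff.mpr (PySem.Set.nodup_ofList score)
  have hpwle : vals.Pairwise (fun a b : Int => b ≤ a) := PySem.List.sorted_pairwise_rev _ _
  have hpwlt : vals.Pairwise (fun a b : Int => b < a) := by
    have := List.Pairwise.and hpwle hnd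
    exact this.imp (fun h => lt_of_le_of_ne h.1 (fun he => h.2 he.symm))
  have hmem : ∀ x ∈ score, x ∈ vals := by
    intro x hx
    exact hperm.mem_iff.mpr ((PySem.Set.mem_ofList score x).mpr hx)
  have hpermL : (PySem.List.sorted score (fun x => x) true).Perm
      (vals.flatMap (fun v => List.replicate (score.count v) v)) :=
    (PySem.List.sorted_perm _ _ _).trans (pv_perm_flatMap score vals hnd hmem).symm
  refine List.Perm.eq_of_pairwise (le := fun a b : Int => b ≤ a) ?_ ?_ ?_ hpermL
  · intro a b _ _ h1 h2
    exact le_antisymm h2 h1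
  · exact PySem.List.sorted_pairwise_rev _ _
  · exact pv_pairwise_flatMap vals _ hpwlt

theorem pv_foldB (score : List Int) (m : Int) (M T : Nat) (hmM : (M : Int) = m) :
    ∀ (vs : List Int) (a : Int) (c : Nat),
    (vs.foldl (fun (p : Int × Int) v =>
        (p.1 + v * (PySem.Int.floordiv (min (p.2 + ((score.count v : Nat) : Int)) ((T : Nat) : Int)) m
                  - PySem.Int.floordiv (min p.2 ((T : Nat) : Int)) m),
         p.2 + ((score.count v : Nat) : Int))) (a, (c : Int))).1
      = a + pvS M T c (vs.flatMap (fun v => List.replicate (score.count v) v)) := by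
  intro vs
  induction vs with
  | nil => intro a c; simp [pvS]
  | cons v vs ih =>
    intro a c
    simp only [List.foldl_cons, List.flatMap_cons]
    have hc2 : (c : Int) + ((score.count v : Nat) : Int) = ((c + score.count v : Nat) : Int) := by
      push_cast; ring
    rw [hc2, ih]
    rw [pvS_append, List.length_replicate, pvS_replicate]
    rw [← hmM, ← Nat.cast_min, ← Nat.cast_min, PySem.Int.floordiv_natCast,
      PySem.Int.floordiv_natCast]
    ring

theorem main_eq (k m : Int) (score : List Int) (hpre : 1 ≤ m) :
    solution k m score = solution_alt k m score := by
  have hmM : ((m.toNat : Nat) : Int) = m := Int.toNat_of_nonneg (by omega)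
  set M := m.toNat with hMdef
  have hMpos : 0 < M := by omega
  set s := PySem.List.sorted score (fun x => x) true with hs
  set L := score.length with hL
  set nN := L / M with hnN
  set T := nN * M with hTdef
  have hTL : T ≤ L := Nat.div_mul_le_self L M
  have hsL : s.length = L := PySem.List.length_sorted _ _ _
  -- A side
  have hlen_s : PySem.List.len s = ((L : Nat) : Int) := by
    simp [PySem.List.len, hsL]
  have hdivA : PySem.Int.floordiv (PySem.List.len s) m = ((nN : Nat) : Int) := by
    rw [hlen_s, ← hmM, PySem.Int.floordiv_natCast]
  have hnm : ((nN : Nat) : Int) * m = ((T : Nat) : Int) := by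
    rw [← hmM, hTdef]; push_cast; ring
  have hslice : PySem.List.slice s none (some ((T : Nat) : Int)) = s.take T :=
    PySem.List.slice_to_natCast s T
  have htake_len : (s.take T).length = T := by
    rw [List.length_take, hsL]; omega
  have hrange : PySem.List.pyRange (m - 1) ((T : Nat) : Int) m
      = (List.range nN).map (fun j : Nat => m - 1 + m * (j : Int)) := by
    rw [PySem.List.pyRange_of_pos _ _ (by omega : (0:Int) < m)]
    have hcnt : (if m - 1 < ((T : Nat) : Int)
        then (((((T : Nat) : Int) - (m - 1) + m - 1)) / m).toNat else 0) = nN := by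
      rcases Nat.eq_zero_or_pos nN with hn0 | hnpos
      · have hT0 : T = 0 := by rw [hTdef, hn0, Nat.zero_mul]
        rw [hT0, hn0, if_neg (by omega)]
      · have hTM : M ≤ T := by
          rw [hTdef]
          exact Nat.le_mul_of_pos_left M hnpos
        rw [if_pos (by rw [← hmM]; omega)]
        have h1 : ((T : Nat) : Int) - (m - 1) + m - 1 = ((T : Nat) : Int) := by ring
        rw [h1, ← hmM, ← Int.natCast_div, Int.toNat_natCast, hTdef,
          Nat.mul_div_cancel nN hMpos]
    rw [hcnt]
  have hA : solution k m score = (∑ j ∈ Finset.range nN, s.getD (M - 1 + M * j) 0) * m := by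
    simp only [solution]
    rw [← hs, hdivA, hnm, hslice]
    have : PySem.List.len (s.take T) = ((T : Nat) : Int) := by
      simp [PySem.List.len, htake_len]
    rw [this, hrange, List.foldl_map, PySem.List.foldl_add
      (g := fun j : Nat => PySem.List.pyGetD (s.take T) (m - 1 + m * (j : Int)) 0 * m)]
    rw [zero_add]
    have hterm : ∀ j ∈ List.range nN,
        PySem.List.pyGetD (s.take T) (m - 1 + m * (j : Int)) 0 * m
          = s.getD (M - 1 + M * j) 0 * m := by
      intro j hj
      rw [List.mem_range] at hj
      have hidx : m - 1 + m * (j : Int) = ((M - 1 + M * j : Nat) : Int) := by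
        rw [← hmM]; push_cast; omega
      rw [hidx, PySem.List.pyGetD_natCast]
      have hlt : M - 1 + M * j < T := by
        have h1 : M * (j + 1) ≤ M * nN := Nat.mul_le_mul_left M hj
        have h2 : M * (j + 1) = M * j + M := by ring
        have h3 : M * nN = T := by rw [hTdef]; ring
        omega
      have : (s.take T).getD (M - 1 + M * j) 0 = s.getD (M - 1 + M * j) 0 := by
        simp only [List.getD, List.getElem?_take, if_pos hlt]
      rw [this]
    rw [List.map_congr_left hterm, List.sum_map_mul_right]
    rfl
  -- B side
  have hB : solution_alt k m score = (∑ j ∈ Finset.range nN, s.getD (M - 1 + M * j) 0) * m := by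
    simp only [solution_alt, PySem.Dict.foldl_insert_getD_add_one_eq_counter,
      PySem.Dict.keys_counter, PySem.Dict.getD_counter]
    have hlen : PySem.List.len score = ((L : Nat) : Int) := by simp [PySem.List.len, hL]
    rw [hlen, ← hmM, PySem.Int.floordiv_natCast, hmM]
    have htot : ((L / M : Nat) : Int) * m = ((T : Nat) : Int) := by
      rw [← hmM, ← Nat.cast_mul, ← hnN, ← hTdef]
    rw [htot]
    have hzero : ((0 : Int), (0 : Int)) = ((0 : Int), ((0 : Nat) : Int)) := by norm_num
    rw [hzero, pv_foldB score m M T hmM]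
    rw [← pv_flat score, ← hs, zero_add]
    rw [pvS_stride M T nN s hMpos rfl (by omega)]
  rw [hA, hB]

-- ===== VERDICT (by name: the statement is the Claim_ definition above) =====
theorem solution_spec : Claim_equal_solution := by
  intro k m score _hdom hpre
  unfold Spec_solution
  exact main_eq k m score hpre
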